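-- pv_equiv track=rewrite | github.com/sgregnt/Algorithms | snippets/qq3.py | droppedRequests
-- ===== SOURCE A (Python) =====
-- def droppedRequests(requestTime):
--     times_record = {}
--
--     ten_sec_drops = {}
--     minute_drops = {}
--
--     for request in requestTime:
--         if request in times_record:
--             times_record[request] += 1
--         else:
--             times_record[request] = 1
--
--     # seconds drop
--     seconds_drop = 0
--     for item in times_record:
--         if times_record[item] > 3:
--             seconds_drop += times_record[item] - 3
--
--     times = sorted([item for item in times_record])
--
--     # 10 seconds drop
--     ten_seconds_drop = 0
--     for item in times:
--         cur_time = item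
--         count_past_10_sec = 0
--
--         for time in range(cur_time - 9, cur_time + 1):
--             if time in times_record:
--                 if not time in ten_sec_drops:
--                     count_past_10_sec += times_record[time]
--                     ten_sec_drops[time] = True
--                 else:
--                     pass
--
--         if count_past_10_sec > 20:
--             ten_seconds_drop += count_past_10_sec - 20
--
--             # minutes drop
--     minute_drop = 0
--     for item in times:
--
--         cur_time = item
--         count_past_min = 0
--
--         for time in range(cur_time - 59, cur_time + 1):
--             if time in times_record:
--                 if not time in minute_drops:
--                     count_past_min += times_record[time]
--                     minute_drops[time] = True
--                 else:
--                     pass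
--
--         if count_past_min > 60:
--             minute_drop += count_past_min - 60
--
--     return seconds_drop + ten_seconds_drop + minute_drop
-- ===== SOURCE B (Python) =====
-- def droppedRequests(requestTime):
--     # One flat pass: the window sweeps in A collapse to per-timestamp counts.
--     counts = {}
--     for t in requestTime:
--         counts[t] = counts.get(t, 0) + 1
--     total = 0
--     for v in counts.values():
--         if v > 3:
--             total += v - 3
--         if v > 20:
--             total += v - 20
--         if v > 60:
--             total += v - 60
--     return total
-- ===== Notes on version B (the rewrite author's own statement) =====
-- stated objective: faster
-- what changed: B replaces A's sort plus two backward-window sweeps with marker dicts by a single flat pass over the frequency map, summing max(0,v-3)+max(0,v-20)+max(0,v-60) per distinct timestamp, since the marker dicts make each of A's window sums collapse to that timestamp's own count.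
import Mathlib
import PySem

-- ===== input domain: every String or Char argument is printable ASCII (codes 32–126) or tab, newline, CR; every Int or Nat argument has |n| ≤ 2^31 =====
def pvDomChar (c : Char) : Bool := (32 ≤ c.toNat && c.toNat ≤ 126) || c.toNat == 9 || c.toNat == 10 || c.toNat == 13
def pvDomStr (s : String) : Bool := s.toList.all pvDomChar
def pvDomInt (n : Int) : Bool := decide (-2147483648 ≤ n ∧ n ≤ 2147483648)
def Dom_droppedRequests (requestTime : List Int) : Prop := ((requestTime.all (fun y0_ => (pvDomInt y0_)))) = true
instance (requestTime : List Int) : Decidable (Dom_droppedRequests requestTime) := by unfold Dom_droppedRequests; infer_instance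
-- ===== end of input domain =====

-- B replaces A's sort + backward-window sweeps (whose marker dicts collapse every window sum
-- to a single timestamp's count) by one flat pass over the frequency map; same return value.


-- ===== PORT A =====
-- A's two window loops ('10 seconds drop' and 'minutes drop') are the same code with the
-- constants (9, 20) resp. (59, 60); pvWindowA is that shared loop body, step for step.
def pvWindowA (times_record : PySem.Dict Int Int) (span limit : Int)
    (st : Int × PySem.Dict Int Bool) (item : Int) : Int × PySem.Dict Int Bool :=
  let cur_time := item
  let inner := (PySem.List.pyRange (cur_time - span) (cur_time + 1)).foldl
    (fun (p : Int × PySem.Dict Int Bool) time =>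
      if times_record.contains time then
        if !(p.2.contains time) then
          (p.1 + times_record.getD time 0, p.2.insert time true)
        else p
      else p) (0, st.2)
  if inner.1 > limit then (st.1 + (inner.1 - limit), inner.2) else (st.1, inner.2)

def droppedRequests (requestTime : List Int) : Int :=
  let times_record : PySem.Dict Int Int := requestTime.foldl
    (fun d request =>
      if d.contains request then d.modify request 0 (· + 1) else d.insert request 1)
    PySem.Dict.empty
  let seconds_drop : Int := times_record.keys.foldl
    (fun acc item =>
      if times_record.getD item 0 > 3 then acc + (times_record.getD item 0 - 3) else acc) 0
  let times := PySem.List.sorted times_record.keys (fun x => x) false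
  let ten := times.foldl (pvWindowA times_record 9 20) (0, PySem.Dict.empty)
  let minute := times.foldl (pvWindowA times_record 59 60) (0, PySem.Dict.empty)
  seconds_drop + ten.1 + minute.1

-- ===== PORT B =====
def droppedRequests_alt (requestTime : List Int) : Int :=
  let counts : PySem.Dict Int Int := requestTime.foldl
    (fun d t => d.insert t (d.getD t 0 + 1)) PySem.Dict.empty
  counts.values.foldl (fun total v =>
    let t1 := if v > 3 then total + (v - 3) else total
    let t2 := if v > 20 then t1 + (v - 20) else t1
    if v > 60 then t2 + (v - 60) else t2) 0

-- ===== PRECONDITION & SPEC =====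
def Spec_droppedRequests (requestTime : List Int) (out : Int) : Prop := out = droppedRequests_alt requestTime
instance (requestTime : List Int) (out : Int) : Decidable (Spec_droppedRequests requestTime out) := by unfold Spec_droppedRequests; infer_instance

-- ===== CLAIM (what is proved, stated in full; the proofs are below) =====
def Claim_equal_droppedRequests : Prop := ∀ (requestTime : List Int), Dom_droppedRequests requestTime → Spec_droppedRequests requestTime (droppedRequests requestTime)

-- ===== LEMMAS AND PROOFS =====

-- A's counter-building loop equals PySem.Dict.counter (missing-key insert = modify from default 0).
lemma pvBuildA_eq_counter (xs : List Int) :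
    xs.foldl (fun d request =>
      if d.contains request then d.modify request 0 (· + 1) else d.insert request 1)
      PySem.Dict.empty = PySem.Dict.counter xs := by
  rw [PySem.Dict.counter_eq_foldl]
  apply PySem.List.foldl_congr_mem
  intro d r _
  by_cases h : d.contains r = true
  · simp [h]
  · simp only [Bool.not_eq_true] at h
    simp only [h, Bool.false_eq_true, if_false]
    apply PySem.Dict.ext
    simp [PySem.Dict.insert, PySem.Dict.modify, h]
    exact PySem.Dict.getD_of_not_contains d 0 h

-- the inner window scan skips every already-marked (or absent) time without touching the state
lemma pvInner_id (R : PySem.Dict Int Int) (L : List Int) (c : Int) (marks : PySem.Dict Int Bool)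
    (h : ∀ x ∈ L, R.contains x = true → marks.contains x = true) :
    L.foldl (fun (p : Int × PySem.Dict Int Bool) time =>
      if R.contains time then
        if !(p.2.contains time) then (p.1 + R.getD time 0, p.2.insert time true) else p
      else p) (c, marks) = (c, marks) := by
  induction L with
  | nil => rfl
  | cons a L ih =>
    simp only [List.foldl_cons]
    by_cases hR : R.contains a = true
    · have hm := h a (by simp) hR
      simp only [hR, if_true, hm, Bool.not_true, Bool.false_eq_true, if_false]
      exact ih (fun x hx => h x (by simp [hx]))
    · simp only [Bool.not_eq_true] at hR
      simp only [hR, Bool.false_eq_true, if_false]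
      exact ih (fun x hx => h x (by simp [hx]))

-- the whole window scan at t collapses to t's own count when all smaller present times are marked
lemma pvInner_eq (R : PySem.Dict Int Int) (span t : Int) (marks : PySem.Dict Int Bool)
    (hspan : 0 ≤ span) (hR : R.contains t = true) (hm : marks.contains t = false)
    (hlt : ∀ x, x < t → R.contains x = true → marks.contains x = true) :
    (PySem.List.pyRange (t - span) (t + 1)).foldl
      (fun (p : Int × PySem.Dict Int Bool) time =>
        if R.contains time then
          if !(p.2.contains time) then (p.1 + R.getD time 0, p.2.insert time true) else p
        else p) (0, marks) = (R.getD t 0, marks.insert t true) := by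
  rw [PySem.List.pyRange_one_succ_right (by omega), List.foldl_append]
  rw [pvInner_id R _ 0 marks (fun x hx hRx => by
    have := (PySem.List.mem_pyRange_one).1 hx
    exact hlt x (by omega) hRx)]
  simp [hR, hm]

-- the outer window loop: with the marker dict holding exactly the present-and-processed times,
-- the loop's first component accumulates max(0, count(t) - limit) over the remaining times
lemma pvOuter (R : PySem.Dict Int Int) (span limit : Int) (hspan : 0 ≤ span)
    (ts : List Int) (marks : PySem.Dict Int Bool) (acc : Int)
    (hts : ts.Pairwise (· < ·))
    (hmem : ∀ t ∈ ts, R.contains t = true)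
    (hinv : ∀ x, marks.contains x = true ↔ (R.contains x = true ∧ x ∉ ts)) :
    (ts.foldl (pvWindowA R span limit) (acc, marks)).1 =
      acc + (ts.map (fun t => if R.getD t 0 > limit then R.getD t 0 - limit else 0)).sum := by
  induction ts generalizing marks acc with
  | nil => simp
  | cons t ts ih =>
    have hhead : ∀ y ∈ ts, t < y := (List.pairwise_cons.1 hts).1
    have hRt : R.contains t = true := hmem t (by simp)
    have hmt : marks.contains t = false := by
      by_contra hc
      have hct : marks.contains t = true := by simpa using hc
      have := ((hinv t).1 hct).2
      simp at this
    have hinner := pvInner_eq R span t marks hspan hRt hmt (by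
      intro x hx hRx
      refine (hinv x).2 ⟨hRx, ?_⟩
      intro hmem'
      rcases List.mem_cons.1 hmem' with h | h
      · omega
      · exact absurd (hhead x h) (by omega))
    have hinv' : ∀ x, (marks.insert t true).contains x = true ↔
        (R.contains x = true ∧ x ∉ ts) := by
      intro x
      rw [PySem.Dict.contains_insert]
      by_cases hx : x = t
      · rw [hx]
        simp only [BEq.rfl, Bool.true_or, true_iff]
        exact ⟨hRt, fun h => absurd (hhead t h) (by omega)⟩
      · have : (x == t) = false := by simp [hx]
        rw [this, Bool.false_or, hinv x]
        constructor
        · rintro ⟨h1, h2⟩; exact ⟨h1, fun h => h2 (by simp [h])⟩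
        · rintro ⟨h1, h2⟩; exact ⟨h1, by simp [hx, h2]⟩
    simp only [List.foldl_cons, List.map_cons, List.sum_cons]
    have hstep : pvWindowA R span limit (acc, marks) t =
        ((if R.getD t 0 > limit then acc + (R.getD t 0 - limit) else acc), marks.insert t true) := by
      unfold pvWindowA
      simp only [hinner]
      split_ifs <;> rfl
    rw [hstep, ih (marks.insert t true) _ (List.pairwise_cons.1 hts).2
      (fun x hx => hmem x (List.mem_cons_of_mem _ hx)) hinv']
    split_ifs <;> ring

-- sorted distinct keys are strictly increasing
lemma pvSorted_lt (ks : List Int) (hnd : ks.Nodup) :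
    (PySem.List.sorted ks (fun x => x) false).Pairwise (· < ·) := by
  have hle := PySem.List.sorted_pairwise ks (fun x => x)
  have hnd' : (PySem.List.sorted ks (fun x => x) false).Nodup :=
    (PySem.List.sorted_perm ks (fun x => x) false).nodup_iff.2 hnd
  have := List.Pairwise.and hle hnd'
  exact this.imp (fun h => lt_of_le_of_ne h.1 h.2)

-- ===== VERDICT (by name: the statement is the Claim_ definition above) =====
theorem droppedRequests_spec : Claim_equal_droppedRequests := by
  intro requestTime _
  unfold Spec_droppedRequests
  show droppedRequests requestTime = droppedRequests_alt requestTime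
  dsimp only [droppedRequests, droppedRequests_alt]
  rw [pvBuildA_eq_counter, PySem.Dict.foldl_insert_getD_add_one_eq_counter]
  set R := PySem.Dict.counter requestTime with hR
  have hnd : R.keys.Nodup := PySem.Dict.nodup_keys_counter requestTime
  -- name the three per-count contributions
  set f3 : Int → Int := fun v => if v > 3 then v - 3 else 0 with hf3
  set f20 : Int → Int := fun v => if v > 20 then v - 20 else 0 with hf20
  set f60 : Int → Int := fun v => if v > 60 then v - 60 else 0 with hf60
  -- B's side: one fold over values = sum of the three maps over keys
  have hB : R.values.foldl (fun total v =>
      let t1 := if v > 3 then total + (v - 3) else total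
      let t2 := if v > 20 then t1 + (v - 20) else t1
      if v > 60 then t2 + (v - 60) else t2) 0 =
      ((R.keys.map (fun k => f3 (R.getD k 0))).sum +
       (R.keys.map (fun k => f20 (R.getD k 0))).sum) +
       (R.keys.map (fun k => f60 (R.getD k 0))).sum := by
    rw [PySem.List.foldl_congr_mem _ _
        (fun total v => total + (f3 v + f20 v + f60 v)) 0
        (by intro acc v _; dsimp only; simp only [hf3, hf20, hf60]; split_ifs <;> ring)]
    rw [PySem.List.foldl_add, PySem.Dict.values_eq_map_keys R hnd 0]
    simp only [List.map_map, Function.comp_def, zero_add]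
    rw [show (fun k => f3 (R.getD k 0) + f20 (R.getD k 0) + f60 (R.getD k 0)) =
        (fun k => (f3 (R.getD k 0) + f20 (R.getD k 0)) + f60 (R.getD k 0)) from rfl,
      PySem.List.sum_map_add_int, PySem.List.sum_map_add_int]
  -- A's seconds loop
  have hA3 : R.keys.foldl (fun acc item =>
      if R.getD item 0 > 3 then acc + (R.getD item 0 - 3) else acc) 0 =
      (R.keys.map (fun k => f3 (R.getD k 0))).sum := by
    rw [PySem.List.foldl_congr_mem _ _ (fun acc k => acc + f3 (R.getD k 0)) 0
        (by intro acc k _; simp only [hf3]; split_ifs <;> ring)]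
    rw [PySem.List.foldl_add, zero_add]
  -- the sorted key list
  set ts := PySem.List.sorted R.keys (fun x => x) false with hts
  have hperm : ts.Perm R.keys := PySem.List.sorted_perm _ _ _
  have hlt : ts.Pairwise (· < ·) := pvSorted_lt R.keys hnd
  have hmem : ∀ t ∈ ts, R.contains t = true := fun t ht =>
    (PySem.Dict.contains_iff_mem_keys R t).2 (hperm.mem_iff.1 ht)
  have hinv0 : ∀ x, (PySem.Dict.empty : PySem.Dict Int Bool).contains x = true ↔
      (R.contains x = true ∧ x ∉ ts) := by
    intro x
    simp only [PySem.Dict.contains_empty, Bool.false_eq_true, false_iff]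
    rintro ⟨h1, h2⟩
    exact h2 (hperm.mem_iff.2 ((PySem.Dict.contains_iff_mem_keys R x).1 h1))
  have h20 := pvOuter R 9 20 (by omega) ts PySem.Dict.empty 0 hlt hmem hinv0
  have h60 := pvOuter R 59 60 (by omega) ts PySem.Dict.empty 0 hlt hmem hinv0
  rw [hA3, h20, h60, hB]
  have e20 : (ts.map (fun t => if R.getD t 0 > 20 then R.getD t 0 - 20 else 0)).sum =
      (R.keys.map (fun k => f20 (R.getD k 0))).sum :=
    (hperm.map _).sum_eq
  have e60 : (ts.map (fun t => if R.getD t 0 > 60 then R.getD t 0 - 60 else 0)).sum =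
      (R.keys.map (fun k => f60 (R.getD k 0))).sum :=
    (hperm.map _).sum_eq
  rw [e20, e60]; ring
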